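-- pv_equiv track=rewrite | github.com/Sharninjak/python | CBC分组密码，小子！_task.py | string2binary
-- ===== SOURCE A (Python) =====
-- def string2binary(str):
--   result = []
--   for i in range(0, len(str), 2):
--     binary = ""
--     for char in str[i:i+2]:
--       binary += bin(ord(char))[2:].zfill(8)
--     result.append(binary)
--   return result
-- ===== SOURCE B (Python) =====
-- def string2binary(str):
--     bits = "".join(bin(ord(c))[2:].zfill(8) for c in str)
--     return [bits[i:i+16] for i in range(0, len(bits), 16)]
-- ===== Notes on version B (the rewrite author's own statement) =====
-- stated objective: simpler
-- what changed: Instead of A's nested loops (outer over character-pair indices, inner concatenating each pair's bits), B builds one flat bitstring in a single pass and then slices it into 16-bit chunks, so the grouping unit is bits, not character pairs.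
import Mathlib
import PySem

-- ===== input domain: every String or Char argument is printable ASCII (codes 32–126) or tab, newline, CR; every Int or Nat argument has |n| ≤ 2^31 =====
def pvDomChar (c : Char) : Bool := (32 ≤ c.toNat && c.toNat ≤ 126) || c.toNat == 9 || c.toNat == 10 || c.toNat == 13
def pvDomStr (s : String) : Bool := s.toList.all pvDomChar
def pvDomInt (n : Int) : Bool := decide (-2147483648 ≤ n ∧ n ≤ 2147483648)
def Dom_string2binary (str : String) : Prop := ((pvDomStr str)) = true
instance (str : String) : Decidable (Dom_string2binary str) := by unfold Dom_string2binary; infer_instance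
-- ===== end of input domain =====

-- B replaces A's nested pair-then-char loops by one flat bit list (8 bits per char) sliced
-- into 16-bit chunks: a different decomposition, chosen for being plainer (same cost).

-- bin(ord(char))[2:].zfill(8) — the identical subexpression both Pythons contain
def charBits (c : Char) : List Char :=
  PySem.Chars.zfill (PySem.List.slice (PySem.Int.toBinChars0b (c.toNat : Int)) (some 2) none) 8

-- ===== PORT A =====
def string2binary (str : String) : List String :=
  let l := str.toList
  (PySem.List.pyRange 0 (PySem.List.len l) 2).foldl
    (fun result i =>
      let binary := (PySem.List.slice l (some i) (some (i + 2))).foldl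
        (fun binary char => binary ++ charBits char) []
      result ++ [String.ofList binary]) []

-- ===== PORT B =====
-- ''.join over the per-char generator is the flattening of the per-char bit lists
def string2binary_alt (str : String) : List String :=
  let bits := str.toList.flatMap charBits
  (PySem.List.pyRange 0 (PySem.List.len bits) 16).map
    (fun i => String.ofList (PySem.List.slice bits (some i) (some (i + 16))))

-- ===== PRECONDITION & SPEC =====
def Spec_string2binary (str : String) (out : List String) : Prop := out = string2binary_alt str
instance (str : String) (out : List String) : Decidable (Spec_string2binary str out) := by unfold Spec_string2binary; infer_instance

-- ===== CLAIM (what is proved, stated in full; the proofs are below) =====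
def Claim_equal_string2binary : Prop := ∀ (str : String), Dom_string2binary str → Spec_string2binary str (string2binary str)

-- ===== LEMMAS AND PROOFS =====

lemma charBits_len_nat : ∀ n : Nat, n ≤ 126 →
    (PySem.Chars.zfill (PySem.List.slice (PySem.Int.toBinChars0b (n : Int)) (some 2) none) 8).length = 8 := by
  decide

lemma charBits_len (c : Char) (h : pvDomChar c = true) : (charBits c).length = 8 := by
  have hn : c.toNat ≤ 126 := by
    simp [pvDomChar] at h
    omega
  exact charBits_len_nat c.toNat hn

lemma flatMap_drop (k : Nat) : ∀ (l : List Char), (∀ c ∈ l, pvDomChar c = true) →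
    (l.flatMap charBits).drop (8 * k) = (l.drop k).flatMap charBits := by
  induction k with
  | zero => intro l _; simp
  | succ k ih =>
    intro l h
    cases l with
    | nil => simp
    | cons c t =>
      have h8 := charBits_len c (h c (by simp))
      have ht : ∀ x ∈ t, pvDomChar x = true := fun x hx => h x (by simp [hx])
      rw [List.flatMap_cons, show 8 * (k + 1) = (charBits c).length + 8 * k from by omega,
          List.drop_append]
      have e1 : List.drop ((charBits c).length + 8 * k) (charBits c) = [] :=
        List.drop_eq_nil_of_le (by omega)
      have e2 : (charBits c).length + 8 * k - (charBits c).length = 8 * k := by omega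
      rw [e1, e2, List.nil_append, ih t ht, List.drop_succ_cons]

lemma flatMap_take (k : Nat) : ∀ (l : List Char), (∀ c ∈ l, pvDomChar c = true) →
    (l.flatMap charBits).take (8 * k) = (l.take k).flatMap charBits := by
  induction k with
  | zero => intro l _; simp
  | succ k ih =>
    intro l h
    cases l with
    | nil => simp
    | cons c t =>
      have h8 := charBits_len c (h c (by simp))
      have ht : ∀ x ∈ t, pvDomChar x = true := fun x hx => h x (by simp [hx])
      rw [List.flatMap_cons, show 8 * (k + 1) = (charBits c).length + 8 * k from by omega,
          List.take_append]
      have e1 : List.take ((charBits c).length + 8 * k) (charBits c) = charBits c :=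
        List.take_of_length_le (by omega)
      have e2 : (charBits c).length + 8 * k - (charBits c).length = 8 * k := by omega
      rw [e1, e2, ih t ht, List.take_succ_cons, List.flatMap_cons]

lemma flatMap_length (l : List Char) (h : ∀ c ∈ l, pvDomChar c = true) :
    (l.flatMap charBits).length = 8 * l.length := by
  induction l with
  | nil => simp
  | cons c t ih =>
    have h8 := charBits_len c (h c (by simp))
    simp [List.flatMap_cons, ih (fun x hx => h x (by simp [hx])), h8]
    ring

lemma flatMap_single {α β : Type} (f : α → β) (l : List α) :
    l.flatMap (fun x => [f x]) = l.map f := by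
  induction l with
  | nil => rfl
  | cons a t ih => simp [List.flatMap_cons, ih]

lemma main_eq (l : List Char) (h : ∀ c ∈ l, pvDomChar c = true) :
    (PySem.List.pyRange 0 (PySem.List.len l) 2).foldl
      (fun result i =>
        result ++ [String.ofList ((PySem.List.slice l (some i) (some (i + 2))).foldl
          (fun binary char => binary ++ charBits char) [])]) []
    = (PySem.List.pyRange 0 (PySem.List.len (l.flatMap charBits)) 16).map
        (fun i => String.ofList (PySem.List.slice (l.flatMap charBits) (some i) (some (i + 16)))) := by
  have hlen := flatMap_length l h
  rw [PySem.List.pyRange_of_pos 0 (PySem.List.len l) (by norm_num),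
      PySem.List.pyRange_of_pos 0 (PySem.List.len (l.flatMap charBits)) (by norm_num)]
  simp only [PySem.List.len_eq, hlen]
  -- the two ranges have the same length
  have hcount : (if (0 : Int) < l.length then (((l.length : Int) - 0 + 2 - 1) / 2).toNat else 0)
      = (if (0 : Int) < (8 * l.length : Nat) then ((((8 * l.length : Nat) : Int) - 0 + 16 - 1) / 16).toNat else 0) := by
    push_cast
    by_cases hl : (0 : Int) < l.length
    · rw [if_pos hl, if_pos (by omega)]
      omega
    · rw [if_neg hl, if_neg (by omega)]
  rw [← hcount, List.foldl_map, List.map_map,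
      PySem.List.foldl_append_eq_flatMap, List.nil_append, flatMap_single]
  · apply List.map_congr_left
    intro k hk
    simp only [List.mem_range] at hk
    simp only [Function.comp]
    have e1 : (0 : Int) + 2 * (k : Int) = ((2 * k : Nat) : Int) := by push_cast; ring
    have e2 : (0 : Int) + 2 * (k : Int) + 2 = ((2 * k : Nat) : Int) + ((2 : Nat) : Int) := by push_cast; ring
    have e3 : (0 : Int) + 16 * (k : Int) = ((16 * k : Nat) : Int) := by push_cast; ring
    have e4 : (0 : Int) + 16 * (k : Int) + 16 = ((16 * k : Nat) : Int) + ((16 : Nat) : Int) := by push_cast; ring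
    rw [e2, e4, e1, e3, PySem.List.slice_natCast_add, PySem.List.slice_natCast_add]
    have hdrop : (l.flatMap charBits).drop (16 * k) = (l.drop (2 * k)).flatMap charBits := by
      have := flatMap_drop (2 * k) l h
      rw [show 8 * (2 * k) = 16 * k by ring] at this
      exact this
    have hdropmem : ∀ c ∈ l.drop (2 * k), pvDomChar c = true :=
      fun c hc => h c (List.mem_of_mem_drop hc)
    have htake : ((l.drop (2 * k)).flatMap charBits).take 16 = ((l.drop (2 * k)).take 2).flatMap charBits := by
      have := flatMap_take 2 (l.drop (2 * k)) hdropmem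
      rw [show 8 * 2 = 16 by ring] at this
      exact this
    rw [hdrop, htake, PySem.List.foldl_append_eq_flatMap, List.nil_append]

-- ===== VERDICT (by name: the statement is the Claim_ definition above) =====
theorem string2binary_spec : Claim_equal_string2binary := by
  intro str hdom
  unfold Spec_string2binary string2binary string2binary_alt
  have h : ∀ c ∈ str.toList, pvDomChar c = true := by
    have := hdom
    unfold Dom_string2binary pvDomStr at this
    simpa [List.all_eq_true] using this
  exact main_eq str.toList h
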